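-- pv_equiv track=rewrite | github.com/motasimmakki/Advance-Python-Programming | PilesOfCoins/PilesOfCoins.py | getPilesResult
-- ===== SOURCE A (Python) =====
-- def allSet(num: int)->bool:
--
--     myNum = num
--     count = 0
--     while num:
--         num >>= 1
--         count +=1
--
--     if myNum == (2**count)-1:
--     	return True
--     return False
--
-- def getPilesResult(coins: int)->str:
--
--     if allSet(coins) | (coins == 1):
--         return "Vaibhavi"
--
--     # 0 for Anjali, and 1 for Vaibhavi.
--     chance = 0
--
--     while not allSet(coins):
--         x = 1
--         while (x & coins) != 0:
--             x <<= 1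
--         if x >= coins:
--             break
--
--         coins -=x
--
--         if chance:
--             chance = 0
--         else:
--             chance = 1
--
--     if chance:
--         winner = "Anjali"
--     else:
--         winner = "Vaibhavi"
--
--     return winner
-- ===== SOURCE B (Python) =====
-- def getPilesResult(coins: int) -> str:
--     # Closed form: the game ends at the largest all-ones number <= coins;
--     # the number of moves equals the popcount of the difference.
--     k = (coins + 1).bit_length() - 1
--     final = (1 << k) - 1
--     moves = bin(coins - final).count('1')
--     return "Anjali" if moves % 2 else "Vaibhavi"
-- ===== Notes on version B (the rewrite author's own statement) =====
-- stated objective: faster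
-- what changed: Replaces A's move-by-move game simulation (repeatedly scanning for the lowest clear bit and subtracting it) by a closed form: the game ends at the largest all-ones number <= coins, and the winner is decided by the parity of the popcount of coins minus that number.
import Mathlib
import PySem

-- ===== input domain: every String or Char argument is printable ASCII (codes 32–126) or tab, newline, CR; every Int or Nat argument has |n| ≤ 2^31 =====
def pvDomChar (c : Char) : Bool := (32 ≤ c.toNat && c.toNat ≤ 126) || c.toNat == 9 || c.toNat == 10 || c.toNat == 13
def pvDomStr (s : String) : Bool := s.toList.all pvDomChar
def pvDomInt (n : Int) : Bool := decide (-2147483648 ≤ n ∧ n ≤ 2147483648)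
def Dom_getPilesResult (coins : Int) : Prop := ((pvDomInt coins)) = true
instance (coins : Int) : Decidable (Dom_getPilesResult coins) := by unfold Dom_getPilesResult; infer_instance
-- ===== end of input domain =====

-- B replaces A's move-by-move game simulation by a closed form (largest all-ones
-- number ≤ coins, parity of the popcount of the difference); proved equal for all
-- coins ≥ 0 (Pre_); for coins < 0 the Python A never terminates.


-- ===== PORT A =====

-- the 'while num: num >>= 1; count += 1' loop of allSet; exact for num ≥ 0
-- (for num < 0 the Python loop never terminates; Pre_ excludes those inputs)
def pvCountBits (num : Int) (count : Nat) : Nat :=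
  if 0 < num then pvCountBits (num >>> (1:Nat)) (count + 1) else count
termination_by num.toNat
decreasing_by
  rename_i h
  have h2 : num >>> (1:Nat) = num / 2 := by
    rw [Int.shiftRight_eq_div_pow]; norm_num
  rw [h2]; omega

def allSet (num : Int) : Bool :=
  let count := pvCountBits num 0
  if num == 2 ^ count - 1 then true else false

-- needed (only) for the termination measures of the two loops below
theorem pvMulTwo (x : Int) : x <<< (1:Nat) = x * 2 := by
  rw [Int.shiftLeft_eq]; norm_num

-- the inner 'x = 1; while (x & coins) != 0: x <<= 1' loop; the extra bound
-- '0 < x ∧ x ≤ coins' (used only for termination) holds automatically whenever the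
-- Python loop continues from a reachable state (coins ≥ 0, x a power of two: a set
-- bit of coins is ≤ coins), so the recursion is Python-exact on Pre_
def pvFindX (coins x : Int) : Int :=
  if PySem.Int.band x coins ≠ 0 ∧ 0 < x ∧ x ≤ coins then pvFindX coins (x <<< (1:Nat))
  else x
termination_by (coins.toNat + 1) - x.toNat
decreasing_by
  rename_i h
  rw [pvMulTwo]; omega

theorem pvFindX_pos (coins x : Int) (hx : 0 < x) : 0 < pvFindX coins x := by
  fun_induction pvFindX coins x with
  | case1 x h ih => exact ih (by rw [pvMulTwo]; omega)
  | case2 x h => exact hx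

-- the outer game loop, carrying (coins, chance)
def pvLoop (coins chance : Int) : Int × Int :=
  if allSet coins = false then
    let x := pvFindX coins 1
    if x ≥ coins then (coins, chance)
    else pvLoop (coins - x) (if chance ≠ 0 then (0:Int) else 1)
  else (coins, chance)
termination_by coins.toNat
decreasing_by
  rename_i hx
  have h1 : 0 < pvFindX coins 1 := pvFindX_pos coins 1 (by norm_num)
  omega

def getPilesResult (coins : Int) : String :=
  if allSet coins || (coins == 1) then "Vaibhavi"
  else
    let r := pvLoop coins 0
    if r.2 ≠ 0 then "Anjali" else "Vaibhavi"

-- ===== PORT B =====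

def getPilesResult_alt (coins : Int) : String :=
  let k := PySem.Int.bitLength (coins + 1) - 1
  let final : Int := (1 <<< k) - 1
  let moves := PySem.Int.bitCount (coins - final)
  if moves % 2 ≠ 0 then "Anjali" else "Vaibhavi"

-- ===== PRECONDITION & SPEC =====

-- Pre_ excludes coins < 0: there the Python A never returns (the shift loop in
-- allSet runs forever on a negative int)
def Pre_getPilesResult (coins : Int) : Prop := 0 ≤ coins
instance (coins : Int) : Decidable (Pre_getPilesResult coins) := by unfold Pre_getPilesResult; infer_instance
def pvWitness_getPilesResult : Int := (6)

def Spec_getPilesResult (coins : Int) (out : String) : Prop := out = getPilesResult_alt coins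
instance (coins : Int) (out : String) : Decidable (Spec_getPilesResult coins out) := by unfold Spec_getPilesResult; infer_instance

-- ===== CLAIM (what is proved, stated in full; the proofs are below) =====
def Claim_equal_getPilesResult : Prop := ∀ (coins : Int), Dom_getPilesResult coins → Pre_getPilesResult coins → Spec_getPilesResult coins (getPilesResult coins)

-- ===== LEMMAS AND PROOFS =====

-- Nat-level views of Python's bit_length / bit_count
def pvBL (m : Nat) : Nat := PySem.Int.bitLength (↑m)
def pvBC (m : Nat) : Nat := PySem.Int.bitCount (↑m)

-- number of moves B counts, as a Nat function
def pvMoves (n : Nat) : Nat := pvBC (n + 1 - 2 ^ (pvBL (n + 1) - 1))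

theorem pvBL_half {m : Nat} (h : 0 < m) : pvBL m = pvBL (m / 2) + 1 :=
  PySem.Int.bitLength_natCast h

theorem pvBC_half {m : Nat} (h : 0 < m) : pvBC m = m % 2 + pvBC (m / 2) :=
  PySem.Int.bitCount_natCast h

theorem pvBL_odd (q : Nat) : pvBL (2 * q + 1) = pvBL q + 1 := by
  rw [pvBL_half (by omega)]; congr 2; omega

theorem pvBL_even {q : Nat} (h : 0 < q) : pvBL (2 * q) = pvBL q + 1 := by
  rw [pvBL_half (by omega)]; congr 2; omega

theorem pvBC_odd (q : Nat) : pvBC (2 * q + 1) = pvBC q + 1 := by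
  rw [pvBC_half (by omega)]
  have : (2 * q + 1) / 2 = q := by omega
  rw [this]; omega

theorem pvBC_even (q : Nat) : pvBC (2 * q) = pvBC q := by
  rcases Nat.eq_zero_or_pos q with h | h
  · subst h; rfl
  · rw [pvBC_half (by omega)]
    have : (2 * q) / 2 = q := by omega
    rw [this]; omega

theorem pvBL_mul_pow {a : Nat} (h : 0 < a) (t : Nat) : pvBL (a * 2 ^ t) = pvBL a + t := by
  induction t with
  | zero => simp
  | succ t ih =>
    have h2 : a * 2 ^ (t + 1) = 2 * (a * 2 ^ t) := by ring
    rw [h2, pvBL_even (by positivity), ih]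
    omega

theorem pvBL_pow (t : Nat) : pvBL (2 ^ t) = t + 1 := by
  have h1 := pvBL_mul_pow (a := 1) (by omega) t
  have h2 : pvBL 1 = 1 := by decide
  rw [one_mul] at h1
  omega

theorem pvBL_two_pow_sub_one (t : Nat) : pvBL (2 ^ t - 1) = t := by
  induction t with
  | zero => simp [pvBL]
  | succ t ih =>
    have h : 2 ^ (t + 1) - 1 = 2 * (2 ^ t - 1) + 1 := by
      have : 0 < 2 ^ t := Nat.two_pow_pos t
      rw [pow_succ]; omega
    rw [h, pvBL_odd, ih]

theorem pvBL_lower {m : Nat} (h : 0 < m) : 2 ^ (pvBL m - 1) ≤ m := by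
  have := PySem.Int.two_pow_bitLength_le (↑m) (by exact_mod_cast h.ne')
  simpa [pvBL] using this

theorem pvBL_pos {m : Nat} (h : 0 < m) : 0 < pvBL m := by
  rw [pvBL_half h]; omega

theorem pvBC_mul_pow (a t : Nat) : pvBC (a * 2 ^ t) = pvBC a := by
  induction t with
  | zero => simp
  | succ t ih =>
    have : a * 2 ^ (t + 1) = 2 * (a * 2 ^ t) := by ring
    rw [this, pvBC_even, ih]

theorem pvCountBits_eq (m : Nat) : ∀ c, pvCountBits (↑m) c = pvBL m + c := by
  induction m using Nat.strong_induction_on with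
  | _ m ih =>
    intro c
    rw [pvCountBits]
    rcases Nat.eq_zero_or_pos m with h | h
    · subst h; simp [pvBL, PySem.Int.bitLength_zero]
    · have hpos : (0:Int) < ↑m := by exact_mod_cast h
      have hs : (↑m : Int) >>> (1:Nat) = ↑(m / 2) := by
        have h0 : (↑m : Int) >>> (1:Nat) = ↑(m >>> 1) := rfl
        rw [h0, Nat.shiftRight_one]
      rw [if_pos hpos, hs, ih (m / 2) (by omega), pvBL_half h]
      omega

theorem allSet_eq (m : Nat) : allSet (↑m) = decide (m = 2 ^ pvBL m - 1) := by
  unfold allSet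
  rw [pvCountBits_eq m 0, Nat.add_zero]
  have h1 : (0:Nat) < 2 ^ pvBL m := Nat.two_pow_pos _
  have hc2 : ((2:Int) ^ pvBL m) = ((2 ^ pvBL m : Nat) : Int) := by push_cast; ring
  show (if ((↑m : Int) == 2 ^ pvBL m - 1) = true then true else false) = decide (m = 2 ^ pvBL m - 1)
  have key : ((↑m : Int) == 2 ^ pvBL m - 1) = decide (m = 2 ^ pvBL m - 1) := by
    by_cases h : m = 2 ^ pvBL m - 1
    · rw [decide_eq_true h]
      exact beq_iff_eq.mpr (by rw [hc2]; omega)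
    · rw [decide_eq_false h]
      apply beq_eq_false_iff_ne.mpr
      intro hcon
      rw [hc2] at hcon
      apply h
      omega
  rw [key]
  cases decide (m = 2 ^ pvBL m - 1) <;> rfl

-- the largest all-ones number: allSet m ↔ B counts zero moves
theorem pvMoves_allSet {m : Nat} (h : m = 2 ^ pvBL m - 1) : pvMoves m = 0 := by
  have h1 : 0 < 2 ^ pvBL m := Nat.two_pow_pos _
  have h2 : m + 1 = 2 ^ pvBL m := by omega
  unfold pvMoves
  rw [h2, pvBL_pow]
  have h3 : 2 ^ pvBL m - 2 ^ (pvBL m + 1 - 1) = 0 := by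
    have : pvBL m + 1 - 1 = pvBL m := by omega
    rw [this]; omega
  rw [h3]
  have : pvBC 0 = 0 := by decide
  exact this

-- any non-all-ones m decomposes as m + 1 = (2q+1)·2^j with q ≥ 1
theorem pvDecomp {m : Nat} (h : ¬ m = 2 ^ pvBL m - 1) :
    ∃ j q, 0 < q ∧ m + 1 = (2 * q + 1) * 2 ^ j := by
  have hm : m ≠ 0 := by
    intro h0; subst h0; simp [pvBL, PySem.Int.bitLength_zero] at h
  obtain ⟨k, w, hw, he⟩ := Nat.exists_eq_two_pow_mul_odd (n := m + 1) (by omega)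
  obtain ⟨q, hq⟩ := hw
  rcases Nat.eq_zero_or_pos q with h0 | h0
  · exfalso
    apply h
    subst h0
    rw [hq] at he
    simp at he
    have h1 : 0 < 2 ^ k := Nat.two_pow_pos _
    have h2 : m = 2 ^ k - 1 := by omega
    rw [h2, pvBL_two_pow_sub_one]
  · exact ⟨k, q, h0, by rw [he, hq]; ring⟩

-- (P·2^i − 1) / 2^i = P − 1
theorem pvDivPow {P : Nat} (i : Nat) (h : 0 < P) : (P * 2 ^ i - 1) / 2 ^ i = P - 1 := by
  have h2 : 0 < 2 ^ i := Nat.two_pow_pos _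
  have h3 : 2 ^ i ≤ P * 2 ^ i := Nat.le_mul_of_pos_left _ h
  have h4 : (P - 1) * 2 ^ i = P * 2 ^ i - 1 * 2 ^ i := Nat.sub_mul P 1 (2 ^ i)
  have h5 : 2 ^ i * (P - 1) = (P - 1) * 2 ^ i := by ring
  have he : P * 2 ^ i - 1 = (2 ^ i - 1) + 2 ^ i * (P - 1) := by omega
  rw [he, Nat.add_mul_div_left _ _ h2, Nat.div_eq_of_lt (by omega)]
  omega

theorem pvTestBit {m j q : Nat} (hq : 0 < q) (hm : m + 1 = (2 * q + 1) * 2 ^ j)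
    (i : Nat) (hi : i ≤ j) :
    m.testBit i = decide (i < j) := by
  have hsplit : 2 ^ j = 2 ^ (j - i) * 2 ^ i := by
    rw [← pow_add]; congr 1; omega
  have hP : m = ((2 * q + 1) * 2 ^ (j - i)) * 2 ^ i - 1 := by
    rw [hsplit] at hm
    have : (2 * q + 1) * (2 ^ (j - i) * 2 ^ i) = ((2 * q + 1) * 2 ^ (j - i)) * 2 ^ i := by ring
    omega
  have hPpos : 0 < (2 * q + 1) * 2 ^ (j - i) :=
    Nat.mul_pos (by omega) (Nat.two_pow_pos _)
  rw [Nat.testBit_eq_decide_div_mod_eq, hP, pvDivPow i hPpos]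
  by_cases hij : i < j
  · have h2 : 2 ^ (j - i) = 2 * 2 ^ (j - i - 1) := by
      rw [← pow_succ']; congr 1; omega
    have : (2 * q + 1) * 2 ^ (j - i) = 2 * ((2 * q + 1) * 2 ^ (j - i - 1)) := by
      rw [h2]; ring
    simp only [this]
    have hpos : 0 < (2 * q + 1) * 2 ^ (j - i - 1) :=
      Nat.mul_pos (by omega) (Nat.two_pow_pos _)
    simp only [hij, decide_true]
    rw [decide_eq_true_iff]
    omega
  · have hij' : i = j := by omega
    have h0 : (2 * q + 1) * 2 ^ (j - i) = 2 * q + 1 := by rw [hij']; simp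
    rw [h0]
    simp only [hij, decide_false]
    rw [decide_eq_false_iff_not]
    omega

-- the inner loop finds exactly the lowest clear bit 2^j
theorem pvFindX_eq {m j q : Nat} (hq : 0 < q) (hm : m + 1 = (2 * q + 1) * 2 ^ j) :
    ∀ i, i ≤ j → pvFindX (↑m) (↑(2 ^ i : Nat)) = ↑(2 ^ j : Nat) := by
  intro i hi
  induction hd : j - i generalizing i with
  | zero =>
    have : i = j := by omega
    subst this
    rw [pvFindX]
    have hb : PySem.Int.band (↑(2 ^ i : Nat)) (↑m) = ↑(2 ^ i &&& m) :=
      PySem.Int.band_natCast _ _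
    have ht : m.testBit i = false := by
      rw [pvTestBit hq hm i hi]; simp
    have : 2 ^ i &&& m = 0 := by
      rw [Nat.two_pow_and, ht]; simp
    rw [if_neg]
    intro hcond
    exact hcond.1 (by rw [hb, this]; rfl)
  | succ d ih =>
    have hij : i < j := by omega
    rw [pvFindX]
    have hb : PySem.Int.band (↑(2 ^ i : Nat)) (↑m) = ↑(2 ^ i &&& m) :=
      PySem.Int.band_natCast _ _
    have ht : m.testBit i = true := by
      rw [pvTestBit hq hm i hi]; simp [hij]
    have hand : 2 ^ i &&& m = 2 ^ i := by
      rw [Nat.two_pow_and, ht]; simp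
    have hle : 2 ^ i ≤ m := by
      have h1 : 2 ^ i ≤ 2 ^ j := Nat.pow_le_pow_right (by omega) (by omega)
      have h2 : 3 * 2 ^ j ≤ (2 * q + 1) * 2 ^ j :=
        Nat.mul_le_mul_right _ (by omega)
      have h3 : 0 < 2 ^ j := Nat.two_pow_pos _
      omega
    rw [if_pos]
    · have hs : (↑(2 ^ i : Nat) : Int) <<< (1:Nat) = ↑(2 ^ (i + 1) : Nat) := by
        rw [pvMulTwo]; push_cast [pow_succ]; ring
      rw [hs]
      exact ih (i + 1) (by omega) (by omega)
    · refine ⟨?_, ?_, ?_⟩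
      · rw [hb, hand]
        exact_mod_cast (Nat.two_pow_pos i).ne'
      · exact_mod_cast Nat.two_pow_pos i
      · exact_mod_cast hle

-- one move of the game decreases B's move count by exactly one
theorem pvMoves_step {m j q : Nat} (hq : 0 < q) (hm : m + 1 = (2 * q + 1) * 2 ^ j) :
    pvMoves m = pvMoves (m - 2 ^ j) + 1 := by
  have hj : 0 < 2 ^ j := Nat.two_pow_pos _
  have hbq : 0 < pvBL q := pvBL_pos hq
  have hlow : 2 ^ (pvBL q - 1) ≤ q := pvBL_lower hq
  have hpow : 2 ^ pvBL q = 2 * 2 ^ (pvBL q - 1) := by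
    rw [← pow_succ']; congr 1; omega
  -- bit length of m+1
  have hbl : pvBL (m + 1) = (pvBL q + 1) + j := by
    rw [hm, pvBL_mul_pow (by omega), pvBL_odd]
  -- moves of m
  have hM : pvMoves m = pvBC (q - 2 ^ (pvBL q - 1)) + 1 := by
    unfold pvMoves
    rw [hbl]
    have hk : (pvBL q + 1) + j - 1 = pvBL q + j := by omega
    rw [hk, hm]
    have h1 : (2 * q + 1) * 2 ^ j - 2 ^ (pvBL q + j)
        = (2 * q + 1 - 2 ^ pvBL q) * 2 ^ j := by
      rw [pow_add, Nat.sub_mul]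
    rw [h1, pvBC_mul_pow]
    have h2 : 2 * q + 1 - 2 ^ pvBL q = 2 * (q - 2 ^ (pvBL q - 1)) + 1 := by omega
    rw [h2, pvBC_odd]
  -- moves of m - 2^j
  have hle : 2 ^ j ≤ m := by
    have h2 : 3 * 2 ^ j ≤ (2 * q + 1) * 2 ^ j := Nat.mul_le_mul_right _ (by omega)
    omega
  have hm' : (m - 2 ^ j) + 1 = q * 2 ^ (j + 1) := by
    have h1 : (2 * q + 1) * 2 ^ j = q * 2 ^ (j + 1) + 2 ^ j := by ring
    omega
  have hbl' : pvBL ((m - 2 ^ j) + 1) = pvBL q + (j + 1) := by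
    rw [hm', pvBL_mul_pow hq]
  have hM' : pvMoves (m - 2 ^ j) = pvBC (q - 2 ^ (pvBL q - 1)) := by
    unfold pvMoves
    rw [hbl']
    have hk : pvBL q + (j + 1) - 1 = pvBL q + j := by omega
    rw [hk, hm']
    have h1 : q * 2 ^ (j + 1) - 2 ^ (pvBL q + j)
        = (2 * q - 2 ^ pvBL q) * 2 ^ j := by
      have a1 : q * 2 ^ (j + 1) = (2 * q) * 2 ^ j := by ring
      have a2 : 2 ^ (pvBL q + j) = 2 ^ pvBL q * 2 ^ j := by rw [pow_add]
      rw [a1, a2, ← Nat.sub_mul]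
    rw [h1, pvBC_mul_pow]
    have h2 : 2 * q - 2 ^ pvBL q = 2 * (q - 2 ^ (pvBL q - 1)) := by omega
    rw [h2, pvBC_even]
  omega

-- the outer loop's chance equals the parity of B's move count
theorem pvLoop_parity (n : Nat) : ∀ c : Int, c = 0 ∨ c = 1 →
    (pvLoop (↑n) c).2 = if pvMoves n % 2 = 0 then c else (if c = 0 then 1 else 0) := by
  induction n using Nat.strong_induction_on with
  | _ n ih =>
    intro c hc
    rw [pvLoop]
    by_cases hA : n = 2 ^ pvBL n - 1
    · rw [allSet_eq, decide_eq_true hA]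
      simp [pvMoves_allSet hA]
    · rw [allSet_eq, decide_eq_false hA]
      obtain ⟨j, q, hq, hm⟩ := pvDecomp hA
      have hx : pvFindX (↑n) 1 = ↑(2 ^ j : Nat) := by
        have := pvFindX_eq hq hm 0 (by omega)
        simpa using this
      have hj : 0 < 2 ^ j := Nat.two_pow_pos _
      have hlt : 2 ^ j < n := by
        have h2 : 3 * 2 ^ j ≤ (2 * q + 1) * 2 ^ j := Nat.mul_le_mul_right _ (by omega)
        omega
      have hnot : ¬ ((↑(2 ^ j : Nat) : Int) ≥ ↑n) := by
        simp only [ge_iff_le, not_le]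
        exact_mod_cast hlt
      rw [hx, if_neg hnot]
      have hsub : (↑n : Int) - ↑(2 ^ j : Nat) = ↑(n - 2 ^ j) := by
        push_cast [Nat.cast_sub hlt.le]; ring
      rw [hsub]
      have hc' : (if c ≠ 0 then (0:Int) else 1) = 0 ∨ (if c ≠ 0 then (0:Int) else 1) = 1 := by
        rcases hc with rfl | rfl <;> simp
      rw [if_pos rfl, ih (n - 2 ^ j) (by omega) _ hc']
      have hstep := pvMoves_step hq hm
      rcases hc with rfl | rfl <;> simp <;> rw [hstep] <;> omega

-- B's port computes pvMoves
theorem pvAlt_eq (n : Nat) :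
    getPilesResult_alt (↑n) = if pvMoves n % 2 ≠ 0 then "Anjali" else "Vaibhavi" := by
  unfold getPilesResult_alt
  have h1 : (↑n + 1 : Int) = ↑(n + 1) := by push_cast; ring
  have hk : PySem.Int.bitLength (↑n + 1) = pvBL (n + 1) := by rw [h1]; rfl
  have hge : 2 ^ (pvBL (n + 1) - 1) ≤ n + 1 := pvBL_lower (by omega)
  have h2 : (↑n : Int) - ((↑((1 <<< (pvBL (n + 1) - 1) : Nat)) : Int) - 1)
      = ↑(n + 1 - 2 ^ (pvBL (n + 1) - 1)) := by
    push_cast [Nat.shiftLeft_eq, hge]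
    ring
  rw [hk]
  show (if PySem.Int.bitCount ((↑n : Int) - ((↑((1 <<< (pvBL (n + 1) - 1) : Nat)) : Int) - 1)) % 2 ≠ 0 then "Anjali" else "Vaibhavi")
      = if pvMoves n % 2 ≠ 0 then "Anjali" else "Vaibhavi"
  rw [h2]
  rfl

theorem pvMain (n : Nat) : getPilesResult (↑n) = getPilesResult_alt (↑n) := by
  rw [pvAlt_eq]
  unfold getPilesResult
  by_cases hA : n = 2 ^ pvBL n - 1
  · rw [allSet_eq, decide_eq_true hA]
    simp [pvMoves_allSet hA]
  · have hone : ¬ ((↑n : Int) == 1) = true := by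
      simp only [beq_iff_eq]
      intro h
      have : n = 1 := by exact_mod_cast h
      subst this
      exact hA (by decide)
    rw [allSet_eq, decide_eq_false hA]
    rw [Bool.false_or, if_neg hone]
    have hp := pvLoop_parity n 0 (Or.inl rfl)
    show (if (pvLoop (↑n) 0).2 ≠ 0 then "Anjali" else "Vaibhavi")
        = if pvMoves n % 2 ≠ 0 then "Anjali" else "Vaibhavi"
    rw [hp]
    by_cases he : pvMoves n % 2 = 0 <;> simp [he]

-- ===== VERDICT (by name: the statement is the Claim_ definition above) =====
theorem getPilesResult_spec : Claim_equal_getPilesResult := by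
  intro coins _ hpre
  unfold Spec_getPilesResult
  have h : coins = ↑coins.toNat := (Int.toNat_of_nonneg hpre).symm
  rw [h]
  exact pvMain coins.toNat
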